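-- pv_equiv track=rewrite | github.com/iboxl/112 | Evaluation/VerifyBruteforce.py | ordered_factorizations
-- ===== SOURCE A (Python) =====
-- def ordered_factorizations(n):
--     """枚举n的所有有序因子分解（因子≥2，乘积=n）。
--     n=1返回空元组（无需循环）。不使用MIREDO的flexible_factorization。"""
--     if n == 1:
--         return [()]
--     result = [(n,)]
--     for d in range(2, n):
--         if n % d == 0:
--             for rest in ordered_factorizations(n // d):
--                 result.append((d,) + rest)
--     return result
-- ===== SOURCE B (Python) =====
-- def ordered_factorizations(n):
--     """Memoized top-down DP; divisors found in O(sqrt(m)) pairs per distinct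
--     subproblem, so each subproblem is computed once."""
--     memo = {}
--
--     def proper_divisors(m):
--         # divisors of m with 2 <= d < m, ascending, via paired enumeration
--         small, large = [], []
--         d = 2
--         while d * d <= m:
--             if m % d == 0:
--                 small.append(d)
--                 q = m // d
--                 if q != d:
--                     large.append(q)
--             d += 1
--         return small + large[::-1]
--
--     def solve(m):
--         if m in memo:
--             return memo[m]
--         if m == 1:
--             res = [()]
--         else:
--             res = [(m,)]
--             for d in proper_divisors(m):
--                 res += [(d,) + rest for rest in solve(m // d)]
--         memo[m] = res
--         return res
--
--     return solve(n)
-- ===== Notes on version B (the rewrite author's own statement) =====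
-- stated objective: faster
-- what changed: B replaces A's naive recursion (which rescans range(2,m) and recomputes the factorizations of the same quotient along every factorization prefix) by memoized top-down dynamic programming whose divisors are enumerated in pairs up to sqrt(m): each distinct subproblem is solved once and each divisor scan is O(sqrt(m)) instead of O(m).
import Mathlib
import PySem

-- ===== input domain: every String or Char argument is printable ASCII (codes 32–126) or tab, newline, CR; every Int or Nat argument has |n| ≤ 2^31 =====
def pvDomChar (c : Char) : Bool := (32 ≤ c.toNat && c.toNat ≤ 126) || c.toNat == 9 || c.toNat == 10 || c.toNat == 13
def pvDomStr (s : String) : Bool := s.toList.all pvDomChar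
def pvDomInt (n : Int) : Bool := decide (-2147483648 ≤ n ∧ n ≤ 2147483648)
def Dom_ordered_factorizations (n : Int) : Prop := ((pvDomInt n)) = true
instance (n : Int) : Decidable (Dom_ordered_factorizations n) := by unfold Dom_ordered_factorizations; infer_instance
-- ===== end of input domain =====

-- B memoizes the recursion (top-down DP: one dict entry per distinct subproblem) and
-- enumerates the divisors of each subproblem in paired fashion up to its square root.

-- termination helper, cited by both ports' decreasing_by
theorem pv_div_toNat_lt {n d : Int} (h2 : 2 ≤ d) (hdn : d < n) :
    (PySem.Int.floordiv n d).toNat < n.toNat := by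
  have hd0 : (0:Int) < d := by omega
  have hlt : PySem.Int.floordiv n d < n := by
    rw [PySem.Int.floordiv_lt_iff_lt_mul hd0]
    have h := mul_le_mul_of_nonneg_left h2 (show (0:Int) ≤ n by omega)
    omega
  have hge : (0:Int) ≤ PySem.Int.floordiv n d := by
    rw [PySem.Int.le_floordiv_iff_mul_le hd0, zero_mul]
    omega
  omega

-- termination helper for the divisor loop: d ≤ d * d over Int
theorem pv_le_sq (d : Int) : d ≤ d * d := by
  rcases le_total d 0 with h | h
  · have := mul_self_nonneg d
    linarith
  · rcases lt_or_eq_of_le h with h1 | h1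
    · have h2 : (1:Int) ≤ d := by omega
      have h3 := mul_le_mul_of_nonneg_left h2 h
      linarith
    · simp [← h1]

-- ===== PORT A =====
def ordered_factorizations (n : Int) : List (List Int) :=
  if n = 1 then [[]]
  else
    (PySem.List.pyRange 2 n 1).attach.foldl
      (fun result ⟨d, hd⟩ =>
        if PySem.Int.mod n d = 0 then
          result ++ (ordered_factorizations (PySem.Int.floordiv n d)).map (fun rest => d :: rest)
        else result)
      [[n]]
termination_by n.toNat
decreasing_by
  have h := PySem.List.mem_pyRange_one.mp hd
  exact pv_div_toNat_lt h.1 h.2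

-- ===== PORT B =====
-- B's `proper_divisors` while-loop: returns (small, large) where the final divisor
-- list is small ++ reversed large (exactly Source B's two append lists).
def pvDivLoop (m d : Int) : List Int × List Int :=
  if h : d * d ≤ m then
    let p := pvDivLoop m (d + 1)
    if PySem.Int.mod m d = 0 then
      let q := PySem.Int.floordiv m d
      (d :: p.1, if q ≠ d then q :: p.2 else p.2)
    else p
  else ([], [])
termination_by (m + 1 - d).toNat
decreasing_by
  have hdm : d ≤ m := le_trans (pv_le_sq d) h
  omega

def pvDivs (m : Int) : List Int := (pvDivLoop m 2).1 ++ (pvDivLoop m 2).2.reverse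

-- characterization of the divisor loop (also cited by pvSolve's decreasing_by via pvDivs_bounds)
theorem pvDivLoop_spec_aux : ∀ (k : Nat) (m d : Int), (m + 1 - d).toNat ≤ k → 2 ≤ d →
    (pvDivLoop m d).1 = (PySem.List.pyRange d m 1).filter
      (fun x => decide (PySem.Int.mod m x = 0 ∧ x * x ≤ m)) ∧
    (pvDivLoop m d).2 = ((PySem.List.pyRange d m 1).filter
      (fun x => decide (PySem.Int.mod m x = 0 ∧ x * x < m))).map (fun x => PySem.Int.floordiv m x) := by
  intro k
  induction k with
  | zero =>
    intro m d hk hd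
    have hmd : m < d := by omega
    have hguard : ¬ d * d ≤ m := by
      have h2d : d * 2 ≤ d * d := mul_le_mul_of_nonneg_left hd (by omega)
      linarith
    rw [pvDivLoop, dif_neg hguard]
    have hrange : PySem.List.pyRange d m 1 = [] := PySem.List.pyRange_one_eq_nil (by omega)
    simp [hrange]
  | succ k ih =>
    intro m d hk hd
    rw [pvDivLoop]
    by_cases hguard : d * d ≤ m
    · rw [dif_pos hguard]
      have h2d : d * 2 ≤ d * d := mul_le_mul_of_nonneg_left hd (by omega)
      have hdm : d < m := by linarith
      obtain ⟨ih1, ih2⟩ := ih m (d + 1) (by omega) (by omega)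
      rw [PySem.List.pyRange_one_cons hdm]
      by_cases hmod : PySem.Int.mod m d = 0
      · rw [if_pos hmod]
        have hdvd : d ∣ m := (PySem.Int.mod_eq_zero_iff_dvd m d).mp hmod
        have hq : PySem.Int.floordiv m d * d = m := by
          rw [PySem.Int.floordiv_eq_ediv_of_pos (show (0:Int) < d by omega)]
          exact Int.ediv_mul_cancel hdvd
        constructor
        · simp [hmod, hguard, ih1]
        · by_cases hne : PySem.Int.floordiv m d = d
          · have hsq : d * d = m := by rw [← hq, hne]
            have hnlt : ¬ d * d < m := by omega
            simp [hmod, hne, hnlt, ih2]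
          · have hlt2 : d * d < m := by
              rcases lt_or_eq_of_le hguard with h | h
              · exact h
              · exfalso
                apply hne
                have : (PySem.Int.floordiv m d - d) * d = 0 := by rw [sub_mul, hq, ← h]; ring
                rcases mul_eq_zero.mp this with h0 | h0
                · omega
                · omega
            simp [hmod, hne, hlt2, ih2]
      · rw [if_neg hmod]
        constructor
        · simp [hmod, ih1]
        · simp [hmod, ih2]
    · rw [dif_neg hguard]
      have hnil : ∀ (p : Int → Prop) [DecidablePred p],
          (∀ x, d ≤ x → ¬ p x) → (PySem.List.pyRange d m 1).filter (fun x => decide (p x)) = [] := by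
        intro p _ hp
        rw [List.filter_eq_nil_iff]
        intro x hx
        have hb := PySem.List.mem_pyRange_one.mp hx
        simpa using hp x hb.1
      constructor
      · rw [hnil _ (fun x hx => ?_)]
        rintro ⟨-, hle⟩
        have : d * d ≤ x * x := mul_le_mul hx hx (by omega) (by omega)
        exact hguard (le_trans this hle)
      · rw [hnil _ (fun x hx => ?_)]
        · rfl
        · rintro ⟨-, hle⟩
          have : d * d ≤ x * x := mul_le_mul hx hx (by omega) (by omega)
          exact hguard (le_trans this (le_of_lt hle))

theorem pvDivLoop_spec (m d : Int) (hd : 2 ≤ d) :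
    (pvDivLoop m d).1 = (PySem.List.pyRange d m 1).filter
      (fun x => decide (PySem.Int.mod m x = 0 ∧ x * x ≤ m)) ∧
    (pvDivLoop m d).2 = ((PySem.List.pyRange d m 1).filter
      (fun x => decide (PySem.Int.mod m x = 0 ∧ x * x < m))).map (fun x => PySem.Int.floordiv m x) :=
  pvDivLoop_spec_aux (m + 1 - d).toNat m d le_rfl hd

-- bounds on the divisor list, cited by pvSolve's decreasing_by
theorem pvDivs_bounds {m x : Int} (hx : x ∈ pvDivs m) : 2 ≤ x ∧ x < m := by
  obtain ⟨h1, h2⟩ := pvDivLoop_spec m 2 le_rfl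
  unfold pvDivs at hx
  rcases List.mem_append.mp hx with hx | hx
  · rw [h1] at hx
    exact (PySem.List.mem_pyRange_one.mp (List.mem_filter.mp hx).1)
  · rw [h2] at hx
    obtain ⟨c, hc, rfl⟩ := List.mem_map.mp (List.mem_reverse.mp hx)
    obtain ⟨hcr, hcp⟩ := List.mem_filter.mp hc
    obtain ⟨hc2, hcm⟩ := PySem.List.mem_pyRange_one.mp hcr
    have hcp' := of_decide_eq_true hcp
    obtain ⟨hmod, hsq⟩ := hcp'
    have hdvd : c ∣ m := (PySem.Int.mod_eq_zero_iff_dvd m c).mp hmod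
    have hq : PySem.Int.floordiv m c * c = m := by
      rw [PySem.Int.floordiv_eq_ediv_of_pos (show (0:Int) < c by omega)]
      exact Int.ediv_mul_cancel hdvd
    set b := PySem.Int.floordiv m c with hb
    have hm0 : 0 < m := by nlinarith
    have hb1 : 1 ≤ b := by nlinarith
    have hb2 : 2 ≤ b := by
      rcases lt_or_eq_of_le hb1 with h | h
      · omega
      · exfalso; nlinarith
    constructor
    · exact hb2
    · nlinarith

def pvSolve (memo : PySem.Dict Int (List (List Int))) (m : Int) :
    List (List Int) × PySem.Dict Int (List (List Int)) :=
  match memo.get? m with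
  | some v => (v, memo)
  | none =>
    if m = 1 then ([[]], memo.insert m [[]])
    else
      let p := (pvDivs m).attach.foldl
        (fun (st : List (List Int) × PySem.Dict Int (List (List Int))) ⟨d, hd⟩ =>
          let q := pvSolve st.2 (PySem.Int.floordiv m d)
          (st.1 ++ q.1.map (fun rest => d :: rest), q.2))
        ([[m]], memo)
      (p.1, p.2.insert m p.1)
termination_by m.toNat
decreasing_by
  have h := pvDivs_bounds hd
  exact pv_div_toNat_lt h.1 h.2

def ordered_factorizations_alt (n : Int) : List (List Int) :=
  (pvSolve PySem.Dict.empty n).1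

-- ===== PRECONDITION & SPEC =====
def Spec_ordered_factorizations (n : Int) (out : List (List Int)) : Prop := out = ordered_factorizations_alt n
instance (n : Int) (out : List (List Int)) : Decidable (Spec_ordered_factorizations n out) := by unfold Spec_ordered_factorizations; infer_instance

-- ===== CLAIM (what is proved, stated in full; the proofs are below) =====
def Claim_equal_ordered_factorizations : Prop := ∀ (n : Int), Dom_ordered_factorizations n → Spec_ordered_factorizations n (ordered_factorizations n)

-- ===== LEMMAS AND PROOFS =====

theorem pv_foldl_attach {α β : Type} (l : List α) (f : β → α → β) (init : β) :
    l.attach.foldl (fun acc x => f acc x.1) init = l.foldl f init := by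
  induction l generalizing init with
  | nil => rfl
  | cons a t ih =>
    simp only [List.attach_cons, List.foldl_cons, List.foldl_map]
    exact ih (f init a)

-- two strictly increasing integer lists with the same members are equal
theorem pv_eq_of_sorted_lt : ∀ (l₁ l₂ : List Int), l₁.Pairwise (· < ·) → l₂.Pairwise (· < ·) →
    (∀ x, x ∈ l₁ ↔ x ∈ l₂) → l₁ = l₂ := by
  intro l₁
  induction l₁ with
  | nil =>
    intro l₂ _ _ hmem
    cases l₂ with
    | nil => rfl
    | cons b t => have := (hmem b).mpr List.mem_cons_self; simp at this
  | cons a t ih =>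
    intro l₂ h₁ h₂ hmem
    cases l₂ with
    | nil => have := (hmem a).mp List.mem_cons_self; simp at this
    | cons b t₂ =>
      have hab : a = b := by
        have ha2 : a ∈ b :: t₂ := (hmem a).mp List.mem_cons_self
        have hb1 : b ∈ a :: t := (hmem b).mpr List.mem_cons_self
        rcases List.mem_cons.mp ha2 with h | h
        · exact h
        · rcases List.mem_cons.mp hb1 with h' | h'
          · exact h'.symm
          · have hlt1 := (List.pairwise_cons.mp h₁).1 b h'
            have hlt2 := (List.pairwise_cons.mp h₂).1 a h
            omega
      subst hab
      have htmem : ∀ x, x ∈ t ↔ x ∈ t₂ := by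
        intro x
        constructor
        · intro hx
          have hax : a < x := (List.pairwise_cons.mp h₁).1 x hx
          rcases List.mem_cons.mp ((hmem x).mp (List.mem_cons_of_mem _ hx)) with h | h
          · omega
          · exact h
        · intro hx
          have hax : a < x := (List.pairwise_cons.mp h₂).1 x hx
          rcases List.mem_cons.mp ((hmem x).mpr (List.mem_cons_of_mem _ hx)) with h | h
          · omega
          · exact h
      rw [ih t₂ (List.pairwise_cons.mp h₁).2 (List.pairwise_cons.mp h₂).2 htmem]

-- the paired enumeration produces exactly A's ascending scan of proper divisors
theorem pvDivs_eq (m : Int) :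
    pvDivs m = (PySem.List.pyRange 2 m 1).filter (fun d => decide (PySem.Int.mod m d = 0)) := by
  obtain ⟨h1, h2⟩ := pvDivLoop_spec m 2 le_rfl
  have hdualdvd : ∀ c : Int, 2 ≤ c → c < m → PySem.Int.mod m c = 0 →
      PySem.Int.floordiv m c * c = m := by
    intro c hc2 hcm hmod
    rw [PySem.Int.floordiv_eq_ediv_of_pos (show (0:Int) < c by omega)]
    exact Int.ediv_mul_cancel ((PySem.Int.mod_eq_zero_iff_dvd m c).mp hmod)
  apply pv_eq_of_sorted_lt
  · -- LHS strictly increasing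
    unfold pvDivs
    rw [h1, h2, List.pairwise_append]
    refine ⟨List.Pairwise.sublist List.filter_sublist (PySem.List.pairwise_lt_pyRange_one 2 m), ?_, ?_⟩
    · rw [List.pairwise_reverse, List.pairwise_map]
      apply List.Pairwise.imp_of_mem ?_
        (List.Pairwise.sublist List.filter_sublist (PySem.List.pairwise_lt_pyRange_one 2 m))
      intro c c' hc hc' hlt
      obtain ⟨hcr, hcp⟩ := List.mem_filter.mp hc
      obtain ⟨hcr', hcp'⟩ := List.mem_filter.mp hc'
      obtain ⟨hc2, hcm⟩ := PySem.List.mem_pyRange_one.mp hcr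
      obtain ⟨hc2', hcm'⟩ := PySem.List.mem_pyRange_one.mp hcr'
      obtain ⟨hmod, hsq⟩ := of_decide_eq_true hcp
      obtain ⟨hmod', hsq'⟩ := of_decide_eq_true hcp'
      have hq := hdualdvd c hc2 hcm hmod
      have hq' := hdualdvd c' hc2' hcm' hmod'
      set p := PySem.Int.floordiv m c
      set p' := PySem.Int.floordiv m c'
      have hm0 : 0 < m := by nlinarith
      have hp'0 : 0 < p' := by nlinarith
      nlinarith
    · intro a ha b hb
      obtain ⟨har, hap⟩ := List.mem_filter.mp ha
      obtain ⟨ha2, ham⟩ := PySem.List.mem_pyRange_one.mp har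
      obtain ⟨hamod, hasq⟩ := of_decide_eq_true hap
      obtain ⟨c, hc, rfl⟩ := List.mem_map.mp (List.mem_reverse.mp hb)
      obtain ⟨hcr, hcp⟩ := List.mem_filter.mp hc
      obtain ⟨hc2, hcm⟩ := PySem.List.mem_pyRange_one.mp hcr
      obtain ⟨hmod, hsq⟩ := of_decide_eq_true hcp
      have hq := hdualdvd c hc2 hcm hmod
      set b := PySem.Int.floordiv m c
      have hcb : c < b := by nlinarith
      have hbb : m < b * b := by nlinarith
      by_contra hle
      push_neg at hle
      have : b * b ≤ a * a := mul_le_mul hle hle (by omega) (by omega)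
      nlinarith
  · exact List.Pairwise.sublist List.filter_sublist (PySem.List.pairwise_lt_pyRange_one 2 m)
  · intro x
    unfold pvDivs
    rw [h1, h2]
    simp only [List.mem_append, List.mem_reverse, List.mem_map, List.mem_filter,
      PySem.List.mem_pyRange_one, decide_eq_true_eq]
    constructor
    · rintro (⟨⟨hx1, hx2⟩, hmod, hsq⟩ | ⟨c, ⟨⟨hc1, hc2⟩, hmod, hsq⟩, rfl⟩)
      · exact ⟨⟨hx1, hx2⟩, hmod⟩
      · have hq := hdualdvd c hc1 hc2 hmod
        set b := PySem.Int.floordiv m c with hbdef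
        have hm0 : 0 < m := by nlinarith
        have hb1 : 1 ≤ b := by nlinarith
        have hb2 : 2 ≤ b := by
          rcases lt_or_eq_of_le hb1 with h | h
          · omega
          · exfalso; nlinarith
        refine ⟨⟨hb2, by nlinarith⟩, ?_⟩
        rw [PySem.Int.mod_eq_zero_iff_dvd]
        exact ⟨c, hq.symm⟩
    · rintro ⟨⟨hz1, hz2⟩, hmod⟩
      by_cases hsq : x * x ≤ m
      · exact Or.inl ⟨⟨hz1, hz2⟩, hmod, hsq⟩
      · push_neg at hsq
        have hq := hdualdvd x hz1 hz2 hmod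
        set c := PySem.Int.floordiv m x with hcdef
        have hm0 : 0 < m := by omega
        have hc1 : 1 ≤ c := by nlinarith
        have hc2 : 2 ≤ c := by
          rcases lt_or_eq_of_le hc1 with h | h
          · omega
          · exfalso; nlinarith
        have hcx : c < x := by nlinarith
        refine Or.inr ⟨c, ⟨⟨hc2, by nlinarith⟩, ?_, by nlinarith⟩, ?_⟩
        · rw [PySem.Int.mod_eq_zero_iff_dvd]
          exact ⟨x, by linarith [hq]⟩
        · rw [PySem.Int.floordiv_eq_ediv_of_pos (show (0:Int) < c by omega)]
          have : m = c * x := by linarith [hq]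
          rw [this, Int.mul_ediv_cancel_left x (by omega : c ≠ 0)]

-- A's loop body, named for the proofs
def pvFA (n : Int) : List (List Int) → Int → List (List Int) :=
  fun result d =>
    if PySem.Int.mod n d = 0 then
      result ++ (ordered_factorizations (PySem.Int.floordiv n d)).map (fun rest => d :: rest)
    else result

-- B's loop body, named for the proofs
def pvFB (m : Int) :
    List (List Int) × PySem.Dict Int (List (List Int)) → Int →
    List (List Int) × PySem.Dict Int (List (List Int)) :=
  fun st d =>
    let q := pvSolve st.2 (PySem.Int.floordiv m d)
    (st.1 ++ q.1.map (fun rest => d :: rest), q.2)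

theorem pvA_eq (n : Int) (h : n ≠ 1) :
    ordered_factorizations n = (PySem.List.pyRange 2 n 1).foldl (pvFA n) [[n]] := by
  conv_lhs => rw [ordered_factorizations]
  rw [if_neg h]
  exact pv_foldl_attach _ (pvFA n) _

theorem pvSolve_eq (memo : PySem.Dict Int (List (List Int))) (m : Int) :
    pvSolve memo m = (match memo.get? m with
      | some v => (v, memo)
      | none =>
        if m = 1 then ([[]], memo.insert m [[]])
        else
          (fun p => (p.1, p.2.insert m p.1))
            ((pvDivs m).foldl (pvFB m) ([[m]], memo))) := by
  rw [pvSolve]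
  cases memo.get? m with
  | some v => rfl
  | none =>
    by_cases h : m = 1
    · simp [h]
    · simp only [if_neg h]
      exact congrArg (fun p => (p.1, p.2.insert m p.1)) (pv_foldl_attach _ (pvFB m) _)

def pvInv (memo : PySem.Dict Int (List (List Int))) : Prop :=
  ∀ k v, memo.get? k = some v → v = ordered_factorizations k

theorem pv_fold_correct (m : Int)
    (IH : ∀ k : Int, k.toNat < m.toNat → ∀ memo, pvInv memo →
      (pvSolve memo k).1 = ordered_factorizations k ∧ pvInv (pvSolve memo k).2) :
    ∀ (L : List Int), (∀ d ∈ L, 2 ≤ d ∧ d < m) →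
    ∀ (acc : List (List Int)) memo, pvInv memo →
      (L.foldl (pvFB m) (acc, memo)).1 =
        L.foldl (fun acc d => acc ++ (ordered_factorizations (PySem.Int.floordiv m d)).map (fun rest => d :: rest)) acc
      ∧ pvInv (L.foldl (pvFB m) (acc, memo)).2 := by
  intro L
  induction L with
  | nil => intro _ acc memo hinv; exact ⟨rfl, hinv⟩
  | cons d t ihL =>
    intro hL acc memo hinv
    obtain ⟨h2, hdm⟩ := hL d (List.mem_cons_self)
    have hk := IH (PySem.Int.floordiv m d) (pv_div_toNat_lt h2 hdm) memo hinv
    simp only [List.foldl_cons]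
    have hstep : pvFB m (acc, memo) d =
        (acc ++ (ordered_factorizations (PySem.Int.floordiv m d)).map (fun rest => d :: rest),
         (pvSolve memo (PySem.Int.floordiv m d)).2) := by
      simp [pvFB, hk.1]
    rw [hstep]
    exact ihL (fun d hd => hL d (List.mem_cons_of_mem _ hd)) _ _ hk.2

theorem pvA_one : ordered_factorizations 1 = [[]] := by
  rw [ordered_factorizations]
  norm_num

theorem pvSolve_correct : ∀ (N : Nat) (m : Int), m.toNat < N → ∀ memo, pvInv memo →
    (pvSolve memo m).1 = ordered_factorizations m ∧ pvInv (pvSolve memo m).2 := by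
  intro N
  induction N with
  | zero => intro m hm; omega
  | succ N ih =>
    intro m hm memo hinv
    rw [pvSolve_eq]
    cases hget : memo.get? m with
    | some v => exact ⟨hinv m v hget, hinv⟩
    | none =>
      dsimp only
      by_cases h1 : m = 1
      · subst h1
        rw [if_pos rfl]
        refine ⟨pvA_one.symm, ?_⟩
        intro k v hkv
        rw [PySem.Dict.get?_insert] at hkv
        split at hkv
        · rename_i hkm
          injection hkv with hv
          subst hv; subst hkm
          exact pvA_one.symm
        · exact hinv k v hkv
      · rw [if_neg h1]
        dsimp only
        rw [pvDivs_eq]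
        have hmem : ∀ d ∈ (PySem.List.pyRange 2 m 1).filter (fun d => decide (PySem.Int.mod m d = 0)),
            2 ≤ d ∧ d < m := by
          intro d hd
          exact PySem.List.mem_pyRange_one.mp (List.mem_filter.mp hd).1
        have hIH : ∀ k : Int, k.toNat < m.toNat → ∀ memo, pvInv memo →
            (pvSolve memo k).1 = ordered_factorizations k ∧ pvInv (pvSolve memo k).2 := by
          intro k hk memo hinv
          exact ih k (by omega) memo hinv
        have hfold := pv_fold_correct m hIH _ hmem [[m]] memo hinv
        have hres : (((PySem.List.pyRange 2 m 1).filter (fun d => decide (PySem.Int.mod m d = 0))).foldl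
            (pvFB m) ([[m]], memo)).1 = ordered_factorizations m := by
          rw [hfold.1, pvA_eq m h1]
          unfold pvFA
          rw [PySem.List.foldl_ite_eq_foldl_filter]
        refine ⟨hres, ?_⟩
        intro k v hkv
        rw [PySem.Dict.get?_insert] at hkv
        split at hkv
        · rename_i hkm
          injection hkv with hv
          subst hv; subst hkm
          exact hres
        · exact hfold.2 k v hkv

-- ===== VERDICT (by name: the statement is the Claim_ definition above) =====
theorem ordered_factorizations_spec : Claim_equal_ordered_factorizations := by
  intro n _
  unfold Spec_ordered_factorizations ordered_factorizations_alt
  have hinv : pvInv PySem.Dict.empty := by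
    intro k v hkv
    simp [PySem.Dict.get?_empty] at hkv
  exact ((pvSolve_correct (n.toNat + 1) n (by omega) _ hinv).1).symm
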